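-- pv_equiv track=rewrite | github.com/8sandro8/Organizador-de-Tareaas | dash_autosync.py | replace_pending_section
-- ===== SOURCE A (Python) =====
-- def replace_pending_section(subj_text, pending_tasks):
--     L = subj_text.splitlines()
--     hdr = None
--     for i, ln in enumerate(L):
--         if ln.strip().lower().startswith("## clases pendientes"):
--             hdr = i; break
--     if hdr is None:
--         head = ["## Clases pendientes"] + (pending_tasks or ["_Sin elementos pendientes detectados._"]) + [""]
--         return ("\n".join([L[0]] + head + L[1:])) if L else "\n".join(head)
--     j = hdr + 1
--     while j < len(L) and not L[j].startswith("## "):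
--         j += 1
--     body = pending_tasks or ["_Sin elementos pendientes detectados._"]
--     newL = L[:hdr+1] + body + [""] + L[j:]
--     return "\n".join(newL)
-- ===== SOURCE B (Python) =====
-- def replace_pending_section(subj_text, pending_tasks):
--     body = pending_tasks or ["_Sin elementos pendientes detectados._"]
--     lines = subj_text.splitlines()
--     out = []
--     state = 0  # 0 = looking for the header, 1 = skipping old section, 2 = copying the tail
--     for ln in lines:
--         if state == 0:
--             out.append(ln)
--             if ln.strip().lower().startswith("## clases pendientes"):
--                 out.extend(body)
--                 out.append("")
--                 state = 1
--         elif state == 1: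
--             if ln.startswith("## "):
--                 out.append(ln)
--                 state = 2
--         else:
--             out.append(ln)
--     if state == 0:  # no header found: insert a fresh section after the first line
--         if lines:
--             out = [lines[0], "## Clases pendientes"] + body + [""] + lines[1:]
--         else:
--             out = ["## Clases pendientes"] + body + [""]
--     return "\n".join(out)
-- ===== Notes on version B (the rewrite author's own statement) =====
-- stated objective: alternative
-- what changed: Replaces A's two index scans (header search, then a while-loop finding the next '## ' line) plus list slicing by a single forward pass over the lines with a three-state machine (searching / skipping the old section / copying the tail).
import Mathlib
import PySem

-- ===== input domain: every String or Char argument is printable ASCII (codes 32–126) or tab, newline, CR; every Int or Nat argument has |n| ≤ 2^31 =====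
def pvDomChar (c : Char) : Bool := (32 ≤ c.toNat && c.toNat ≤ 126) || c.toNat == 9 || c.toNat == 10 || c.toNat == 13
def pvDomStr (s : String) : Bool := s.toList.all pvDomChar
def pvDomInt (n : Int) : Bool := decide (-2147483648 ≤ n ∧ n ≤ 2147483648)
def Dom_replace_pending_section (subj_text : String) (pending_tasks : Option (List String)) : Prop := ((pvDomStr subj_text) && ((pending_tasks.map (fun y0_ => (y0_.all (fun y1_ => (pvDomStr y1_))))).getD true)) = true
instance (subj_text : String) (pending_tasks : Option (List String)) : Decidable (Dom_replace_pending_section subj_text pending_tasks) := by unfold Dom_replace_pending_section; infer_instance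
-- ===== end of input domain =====

-- B replaces A's two index scans plus list slicing by one forward pass with a
-- three-state machine over the lines (objective: alternative decomposition, same cost).

-- shared transliterations of the two predicate expressions both Pythons write verbatim
-- `ln.strip().lower().startswith("## clases pendientes")`
def pvHdrPred (ln : String) : Bool :=
  PySem.Str.startswith (PySem.Str.lower (PySem.Str.strip ln)) "## clases pendientes"
-- `ln.startswith("## ")`
def pvSecPred (ln : String) : Bool := PySem.Str.startswith ln "## "
-- `pending_tasks or ["_Sin elementos pendientes detectados._"]` (None and the empty list are falsy)
def pvOrDefault (pending_tasks : Option (List String)) : List String :=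
  match pending_tasks with
  | none => ["_Sin elementos pendientes detectados._"]
  | some l => if l = [] then ["_Sin elementos pendientes detectados._"] else l

-- ===== PORT A =====
-- A's `for i, ln in enumerate(L): … break` search for the header index
def pvFindHdr : List String → Nat → Option Nat
  | [], _ => none
  | ln :: rest, i => if pvHdrPred ln then some i else pvFindHdr rest (i + 1)

-- A's `while j < len(L) and not L[j].startswith("## "): j += 1`
def pvSkip (L : List String) (j : Nat) : Nat :=
  if j < L.length ∧ ¬ pvSecPred (L.getD j "") = true then pvSkip L (j + 1) else j
termination_by L.length - j
decreasing_by omega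

def replace_pending_section (subj_text : String) (pending_tasks : Option (List String)) : String :=
  let L := PySem.Str.splitlines subj_text
  match pvFindHdr L 0 with
  | none =>
    let head := "## Clases pendientes" :: (pvOrDefault pending_tasks ++ [""])
    match L with
    | [] => PySem.Str.join "\n" head
    | l0 :: rest => PySem.Str.join "\n" ([l0] ++ head ++ rest)
  | some hdr =>
    let j := pvSkip L (hdr + 1)
    let body := pvOrDefault pending_tasks
    -- L[:hdr+1] and L[j:] with nonnegative in-range bounds are exactly take/drop
    PySem.Str.join "\n" (L.take (hdr + 1) ++ body ++ [""] ++ L.drop j)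

-- ===== PORT B =====
-- B's single pass: state 0 = looking for the header, 1 = skipping the old section, 2 = copying
def pvBLoop (body : List String) : List String → Nat → List String × Nat
  | [], st => ([], st)
  | ln :: rest, st =>
    if st = 0 then
      if pvHdrPred ln then
        let r := pvBLoop body rest 1
        (ln :: (body ++ [""] ++ r.1), r.2)
      else
        let r := pvBLoop body rest 0
        (ln :: r.1, r.2)
    else if st = 1 then
      if pvSecPred ln then
        let r := pvBLoop body rest 2
        (ln :: r.1, r.2)
      else pvBLoop body rest 1
    else
      let r := pvBLoop body rest 2
      (ln :: r.1, r.2)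

def replace_pending_section_alt (subj_text : String) (pending_tasks : Option (List String)) : String :=
  let body := pvOrDefault pending_tasks
  let lines := PySem.Str.splitlines subj_text
  let r := pvBLoop body lines 0
  if r.2 = 0 then
    match lines with
    | [] => PySem.Str.join "\n" ("## Clases pendientes" :: (body ++ [""]))
    | l0 :: rest => PySem.Str.join "\n" (l0 :: "## Clases pendientes" :: (body ++ [""] ++ rest))
  else PySem.Str.join "\n" r.1

-- ===== PRECONDITION & SPEC =====
def Spec_replace_pending_section (subj_text : String) (pending_tasks : Option (List String)) (out : String) : Prop := out = replace_pending_section_alt subj_text pending_tasks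
instance (subj_text : String) (pending_tasks : Option (List String)) (out : String) : Decidable (Spec_replace_pending_section subj_text pending_tasks out) := by unfold Spec_replace_pending_section; infer_instance

-- ===== CLAIM (what is proved, stated in full; the proofs are below) =====
def Claim_equal_replace_pending_section : Prop := ∀ (subj_text : String) (pending_tasks : Option (List String)), Dom_replace_pending_section subj_text pending_tasks → Spec_replace_pending_section subj_text pending_tasks (replace_pending_section subj_text pending_tasks)

-- ===== LEMMAS AND PROOFS =====

theorem pvFindHdr_none (L : List String) (i : Nat) (h : ∀ x ∈ L, pvHdrPred x = false) :
    pvFindHdr L i = none := by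
  induction L generalizing i with
  | nil => rfl
  | cons ln rest ih =>
    simp [pvFindHdr, h ln (by simp)]
    exact ih _ (fun x hx => h x (by simp [hx]))

theorem pvFindHdr_split (P R : List String) (ln : String) (i : Nat)
    (hP : ∀ x ∈ P, pvHdrPred x = false) (hln : pvHdrPred ln = true) :
    pvFindHdr (P ++ ln :: R) i = some (i + P.length) := by
  induction P generalizing i with
  | nil => simp [pvFindHdr, hln]
  | cons a P ih =>
    simp [pvFindHdr, hP a (by simp)]
    rw [ih _ (fun x hx => hP x (by simp [hx]))]
    simp; omega

theorem pvBLoop_two (body L : List String) : pvBLoop body L 2 = (L, 2) := by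
  induction L with
  | nil => rfl
  | cons ln rest ih => simp [pvBLoop, ih]

theorem pvBLoop_one (body R : List String) :
    (pvBLoop body R 1).1 = R.dropWhile (fun x => !pvSecPred x) ∧ (pvBLoop body R 1).2 ≠ 0 := by
  induction R with
  | nil => simp [pvBLoop]
  | cons ln rest ih =>
    by_cases h : pvSecPred ln = true
    · simp [pvBLoop, h, pvBLoop_two, List.dropWhile]
    · simp only [Bool.not_eq_true] at h
      simp [pvBLoop, h, List.dropWhile, ih]

theorem pvBLoop_none (body L : List String) (h : ∀ x ∈ L, pvHdrPred x = false) :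
    pvBLoop body L 0 = (L, 0) := by
  induction L with
  | nil => rfl
  | cons ln rest ih =>
    have := ih (fun x hx => h x (by simp [hx]))
    simp [pvBLoop, h ln (by simp), this]

theorem pvBLoop_split (body P R : List String) (ln : String)
    (hP : ∀ x ∈ P, pvHdrPred x = false) (hln : pvHdrPred ln = true) :
    pvBLoop body (P ++ ln :: R) 0 =
      (P ++ ln :: (body ++ [""] ++ (pvBLoop body R 1).1), (pvBLoop body R 1).2) := by
  induction P with
  | nil => simp [pvBLoop, hln]
  | cons a P ih =>
    have := ih (fun x hx => hP x (by simp [hx]))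
    simp [pvBLoop, hP a (by simp), this]

theorem pvSkip_drop (L : List String) (j : Nat) :
    L.drop (pvSkip L j) = (L.drop j).dropWhile (fun x => !pvSecPred x) := by
  by_cases hj : j < L.length
  · have hget : L.getD j "" = L[j] := by
      simp [List.getD_eq_getElem?_getD, List.getElem?_eq_getElem hj]
    rw [List.drop_eq_getElem_cons hj]
    by_cases hs : pvSecPred (L[j]) = true
    · rw [pvSkip]
      simp [List.getD_eq_getElem?_getD, List.getElem?_eq_getElem hj, hs, List.dropWhile]
    · rw [pvSkip]
      simp only [hget, hj, hs, List.dropWhile]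
      simp only [Bool.not_eq_true] at hs
      simp only [Bool.not_false]
      exact pvSkip_drop L (j + 1)
  · rw [pvSkip]
    simp [hj, List.drop_eq_nil_of_le (by omega : L.length ≤ j)]
termination_by L.length - j
decreasing_by omega

theorem dropWhile_eq_cons_pred (p : String → Bool) (L R : List String) (ln : String)
    (h : L.dropWhile p = ln :: R) : p ln = false := by
  induction L with
  | nil => simp [List.dropWhile] at h
  | cons a L ih =>
    by_cases hp : p a = true
    · exact ih (by simpa [List.dropWhile, hp] using h)
    · simp [List.dropWhile, hp] at h
      simp only [Bool.not_eq_true] at hp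
      rw [← h.1]; exact hp

theorem key_lemma (body L : List String) :
    (match pvFindHdr L 0 with
     | none =>
       match L with
       | [] => PySem.Str.join "\n" ("## Clases pendientes" :: (body ++ [""]))
       | l0 :: rest => PySem.Str.join "\n" ([l0] ++ ("## Clases pendientes" :: (body ++ [""])) ++ rest)
     | some hdr =>
       PySem.Str.join "\n" (L.take (hdr + 1) ++ body ++ [""] ++ L.drop (pvSkip L (hdr + 1)))) =
    (if (pvBLoop body L 0).2 = 0 then
       match L with
       | [] => PySem.Str.join "\n" ("## Clases pendientes" :: (body ++ [""]))
       | l0 :: rest => PySem.Str.join "\n" (l0 :: "## Clases pendientes" :: (body ++ [""] ++ rest))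
     else PySem.Str.join "\n" (pvBLoop body L 0).1) := by
  by_cases h : ∀ x ∈ L, pvHdrPred x = false
  · rw [pvFindHdr_none L 0 h, pvBLoop_none body L h]
    cases L with
    | nil => simp
    | cons l0 rest => simp
  · -- some line satisfies the header predicate: split L at the first one
    have hne : L.dropWhile (fun x => !pvHdrPred x) ≠ [] := by
      intro hnil
      apply h
      intro x hx
      have heq := List.takeWhile_append_dropWhile (p := fun x => !pvHdrPred x) (l := L)
      rw [hnil, List.append_nil] at heq
      have hx' : x ∈ L.takeWhile (fun x => !pvHdrPred x) := by rw [heq]; exact hx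
      simpa using List.mem_takeWhile_imp hx'
    obtain ⟨ln, R, hdr_eq⟩ := List.exists_cons_of_ne_nil hne
    have hln : pvHdrPred ln = true := by
      have := dropWhile_eq_cons_pred (fun x => !pvHdrPred x) L R ln hdr_eq
      simpa using this
    have hP : ∀ x ∈ L.takeWhile (fun x => !pvHdrPred x), pvHdrPred x = false := by
      intro x hx
      simpa using List.mem_takeWhile_imp hx
    have hdecomp : L = L.takeWhile (fun x => !pvHdrPred x) ++ ln :: R := by
      conv_lhs => rw [← List.takeWhile_append_dropWhile (p := fun x => !pvHdrPred x) (l := L)]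
      rw [hdr_eq]
    generalize hPdef : L.takeWhile (fun x => !pvHdrPred x) = P at hdecomp hP
    rw [hdecomp]
    rw [pvFindHdr_split P R ln 0 hP hln, pvBLoop_split body P R ln hP hln]
    obtain ⟨h1, h2⟩ := pvBLoop_one body R
    simp only [Nat.zero_add]
    rw [if_neg h2, h1]
    have htake : (P ++ ln :: R).take (P.length + 1) = P ++ [ln] := by
      simp [List.take_append]
    have hdrop : (P ++ ln :: R).drop (pvSkip (P ++ ln :: R) (P.length + 1)) =
        R.dropWhile (fun x => !pvSecPred x) := by
      have hR : (P ++ ln :: R).drop (P.length + 1) = R := by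
        simp [List.drop_append]
      rw [pvSkip_drop, hR]
    rw [htake, hdrop]
    simp

-- ===== VERDICT (by name: the statement is the Claim_ definition above) =====
theorem replace_pending_section_spec : Claim_equal_replace_pending_section := by
  intro s pt _
  unfold Spec_replace_pending_section replace_pending_section replace_pending_section_alt
  exact key_lemma (pvOrDefault pt) (PySem.Str.splitlines s)
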